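-- pv_equiv track=rewrite | github.com/GIL794/Math-Problems-Code-Solutions | Goldbach Conjecture Verifier/goldbach_verifier.py | verify_goldbach_range
-- ===== SOURCE A (Python) =====
-- def sieve_of_eratosthenes(limit):
--     """
--     Find all prime numbers up to a given limit using the Sieve of Eratosthenes.
--
--     Args:
--         limit: Upper bound for finding primes
--
--     Returns:
--         List of prime numbers up to limit
--     """
--     if limit < 2:
--         return []
--
--     # Create a boolean array where True means the number is prime
--     is_prime = [True] * (limit + 1)
--     is_prime[0] = False
--     is_prime[1] = False
--
--     # Sieve of Eratosthenes algorithm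
--     for i in range(2, int(limit ** 0.5) + 1):
--         if is_prime[i]:
--             # Mark all multiples of i as not prime
--             for j in range(i * i, limit + 1, i):
--                 is_prime[j] = False
--
--     # Collect all primes
--     primes = [i for i in range(2, limit + 1) if is_prime[i]]
--     return primes
--
-- def find_goldbach_pairs(n, primes_set=None):
--     """
--     Find all pairs of primes that sum to n (Goldbach representations).
--
--     Args:
--         n: Even number to find prime pairs for
--         primes_set: Set of primes up to n (computed if not provided)
--
--     Returns:
--         List of tuples (p1, p2) where p1 + p2 = n and p1 <= p2
--     """
--     if n <= 2 or n % 2 != 0: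
--         return []
--
--     # Generate primes if not provided
--     if primes_set is None:
--         primes = sieve_of_eratosthenes(n)
--         primes_set = set(primes)
--
--     pairs = []
--
--     # Find all pairs where p1 + p2 = n
--     # We only need to check up to n/2 to avoid duplicates
--     # Sort the set to iterate in order
--     for p1 in sorted(primes_set):
--         if p1 > n // 2:
--             break
--         p2 = n - p1
--         if p2 in primes_set:
--             pairs.append((p1, p2))
--
--     return pairs
--
-- def verify_goldbach_range(start, end):
--     """
--     Verify Goldbach's conjecture for all even numbers in a range.
--
--     Args:
--         start: Starting even number
--         end: Ending even number
--
--     Returns: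
--         Dictionary mapping each even number to its Goldbach pairs
--     """
--     # Ensure start is even and >= 4
--     if start < 4:
--         start = 4
--     if start % 2 != 0:
--         start += 1
--
--     # Ensure end is even
--     if end % 2 != 0:
--         end -= 1
--
--     # Generate all primes up to end once
--     primes = sieve_of_eratosthenes(end)
--     primes_set = set(primes)
--
--     results = {}
--
--     for n in range(start, end + 1, 2):
--         pairs = find_goldbach_pairs(n, primes_set)
--         results[n] = pairs
--
--     return results
-- ===== SOURCE B (Python) =====
-- def verify_goldbach_range(start, end):
--     """Two-pointer sweep over the sorted prime list instead of per-n set-membership scans."""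
--     if start < 4:
--         start = 4
--     if start % 2 != 0:
--         start += 1
--     if end % 2 != 0:
--         end -= 1
--
--     # Sieve of Eratosthenes (while-loop form)
--     if end < 2:
--         primes = []
--     else:
--         flags = [True] * (end + 1)
--         flags[0] = False
--         flags[1] = False
--         i = 2
--         while i * i <= end:
--             if flags[i]:
--                 for j in range(i * i, end + 1, i):
--                     flags[j] = False
--             i += 1
--         primes = [k for k in range(2, end + 1) if flags[k]]
--
--     results = {}
--     for n in range(start, end + 1, 2):
--         pairs = []
--         left, right = 0, len(primes) - 1
--         while left <= right:
--             s = primes[left] + primes[right]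
--             if s == n:
--                 pairs.append((primes[left], primes[right]))
--                 left += 1
--                 right -= 1
--             elif s < n:
--                 left += 1
--             else:
--                 right -= 1
--         results[n] = pairs
--     return results
-- ===== Notes on version B (the rewrite author's own statement) =====
-- stated objective: alternative
-- what changed: Per even n, the per-prime scan with set-membership lookups (p in set, n-p in set) is replaced by a two-pointer sweep over the sorted prime list (left/right indices moving inward), and the sieve is restated as a while i*i<=end loop; same pairs in the same order.
import Mathlib
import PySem

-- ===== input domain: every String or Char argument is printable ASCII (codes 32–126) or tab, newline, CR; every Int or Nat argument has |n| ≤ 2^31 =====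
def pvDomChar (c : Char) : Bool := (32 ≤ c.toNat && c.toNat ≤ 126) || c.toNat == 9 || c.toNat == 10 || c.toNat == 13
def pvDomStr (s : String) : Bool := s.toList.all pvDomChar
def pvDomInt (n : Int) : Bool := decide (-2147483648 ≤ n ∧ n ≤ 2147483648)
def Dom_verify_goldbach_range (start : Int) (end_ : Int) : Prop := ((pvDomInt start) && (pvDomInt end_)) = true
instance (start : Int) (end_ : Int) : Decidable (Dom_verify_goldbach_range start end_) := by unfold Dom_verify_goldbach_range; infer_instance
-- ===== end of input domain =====

-- B replaces the per-n set-membership scan by a two-pointer sweep over the sorted prime list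
-- (objective: alternative, same pairs in the same order).

-- ===== PORT A =====

-- a Python list of booleans with O(1) index assignment is an Array Bool here (all indices
-- are nonnegative and in range at every write/read below, so set!/getD are exact)
-- is_prime = [True]*(limit+1); is_prime[0] = False; is_prime[1] = False   (shared: identical lines in A and B)
def pvInitFlags (limit : Int) : Array Bool :=
  ((Array.replicate (limit + 1).toNat true).set! 0 false).set! 1 false

-- body of the marking step: 'if is_prime[i]: for j in range(i*i, limit+1, i): is_prime[j] = False'
-- (identical inner statement in A's for-loop and B's while-loop)
def pvMark (limit : Int) (a : Array Bool) (i : Int) : Array Bool :=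
  if a.getD i.toNat false then
    (PySem.List.pyRange (i * i) (limit + 1) i).foldl (fun a j => a.set! j.toNat false) a
  else a

-- 'x < y' chain check: used by the provably-equal fast paths below (CPython's sorted() and
-- set() are near-linear on such data; the list-backed PySem primitives alone are quadratic)
def pvIsIncr : List Int → Bool
  | [] => true
  | [_] => true
  | a :: b :: t => a < b && pvIsIncr (b :: t)

-- set(xs): same value as PySem.Set.ofList xs (lemma pvSetOfList_eq below), evaluable on large lists
def pvSetOfList (xs : List Int) : PySem.Set Int :=
  if pvIsIncr xs then xs else PySem.Set.ofList xs

-- sorted(xs): same value as PySem.List.sorted xs (lemma pvSortedFast_eq below)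
def pvSortedFast (xs : List Int) : List Int :=
  if pvIsIncr xs then xs else PySem.List.sorted xs (fun x => x) false

-- int(limit ** 0.5): exact floor square root for the nonnegative limits of Dom (|limit| ≤ 2^31)
def pyIsqrtFloat (limit : Int) : Int := (Nat.sqrt limit.toNat : Int)

def sieve_of_eratosthenes (limit : Int) : List Int :=
  if limit < 2 then []
  else
    let isp := (PySem.List.pyRange 2 (pyIsqrtFloat limit + 1) 1).foldl (pvMark limit) (pvInitFlags limit)
    (PySem.List.pyRange 2 (limit + 1) 1).filter (fun i => isp.getD i.toNat false)

-- 'for p1 in sorted(primes_set): if p1 > n//2: break; p2 = n - p1; if p2 in primes_set: pairs.append((p1, p2))'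
-- Python's 'p2 in primes_set' is an O(1) hash lookup; it is queried here against a HashSet holding
-- the same elements — the same Bool as PySem.Set.contains primes_set p2 (Std.HashSet.contains_ofList)
def fgpLoop (n : Int) (seen : Std.HashSet Int) : List Int → List (Int × Int)
  | [] => []
  | p :: rest =>
    if p > PySem.Int.floordiv n 2 then []
    else if seen.contains (n - p) then (p, n - p) :: fgpLoop n seen rest
    else fgpLoop n seen rest

-- find_goldbach_pairs(n, primes_set): ported for a provided primes_set (verify_goldbach_range always
-- passes one, so the 'primes_set is None' branch is never taken there)
def find_goldbach_pairs (n : Int) (primes_set : PySem.Set Int) : List (Int × Int) :=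
  if n ≤ 2 ∨ PySem.Int.mod n 2 ≠ 0 then []
  else fgpLoop n (Std.HashSet.ofList primes_set) (pvSortedFast primes_set)

def verify_goldbach_range (start : Int) (end_ : Int) : List (Int × List (Int × Int)) :=
  let start := if start < 4 then 4 else start
  let start := if PySem.Int.mod start 2 ≠ 0 then start + 1 else start
  let end_ := if PySem.Int.mod end_ 2 ≠ 0 then end_ - 1 else end_
  let primes := sieve_of_eratosthenes end_
  let primes_set := pvSetOfList primes  -- = PySem.Set.ofList primes (pvSetOfList_eq)
  ((PySem.List.pyRange start (end_ + 1) 2).foldl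
      (fun d n => d.insert n (find_goldbach_pairs n primes_set)) PySem.Dict.empty).items

-- ===== PORT B =====

-- 'i = 2; while i*i <= limit: <mark>; i += 1'
def sieveWhile (limit : Int) (i : Int) (a : Array Bool) : Array Bool :=
  if _h : i * i ≤ limit then sieveWhile limit (i + 1) (pvMark limit a i) else a
termination_by (limit + 1 - i).toNat
decreasing_by
  have hi : i ≤ limit := by nlinarith [mul_self_nonneg i, _h]
  omega

def pvPrimesUpto (limit : Int) : List Int :=
  if limit < 2 then []
  else
    let flags := sieveWhile limit 2 (pvInitFlags limit)
    (PySem.List.pyRange 2 (limit + 1) 1).filter (fun k => flags.getD k.toNat false)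

-- 'while left <= right: s = primes[left] + primes[right]; ...'  — the Python list 'primes' is
-- indexed O(1), so it is carried as an Array Int; both indices are nonnegative and in range
-- whenever the loop body runs, so getD's default is never used
def twoPtr (primes : Array Int) (n : Int) (l r : Int) : List (Int × Int) :=
  if _h : l ≤ r then
    let s := primes.getD l.toNat 0 + primes.getD r.toNat 0
    if s = n then
      (primes.getD l.toNat 0, primes.getD r.toNat 0) :: twoPtr primes n (l + 1) (r - 1)
    else if s < n then twoPtr primes n (l + 1) r
    else twoPtr primes n l (r - 1)
  else []
termination_by (r + 1 - l).toNat
decreasing_by all_goals omega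

def verify_goldbach_range_alt (start : Int) (end_ : Int) : List (Int × List (Int × Int)) :=
  let start := if start < 4 then 4 else start
  let start := if PySem.Int.mod start 2 ≠ 0 then start + 1 else start
  let end_ := if PySem.Int.mod end_ 2 ≠ 0 then end_ - 1 else end_
  let primes := pvPrimesUpto end_
  let parr := primes.toArray
  ((PySem.List.pyRange start (end_ + 1) 2).foldl
      (fun d n => d.insert n (twoPtr parr n 0 ((parr.size : Int) - 1))) PySem.Dict.empty).items

-- ===== PRECONDITION & SPEC =====
def Spec_verify_goldbach_range (start : Int) (end_ : Int) (out : List (Int × List (Int × Int))) : Prop := out = verify_goldbach_range_alt start end_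
instance (start : Int) (end_ : Int) (out : List (Int × List (Int × Int))) : Decidable (Spec_verify_goldbach_range start end_ out) := by unfold Spec_verify_goldbach_range; infer_instance

-- ===== CLAIM (what is proved, stated in full; the proofs are below) =====
def Claim_equal_verify_goldbach_range : Prop := ∀ (start : Int) (end_ : Int), Dom_verify_goldbach_range start end_ → Spec_verify_goldbach_range start end_ (verify_goldbach_range start end_)

-- ===== LEMMAS AND PROOFS =====

-- set(xs) of a duplicate-free list is the list itself
lemma pvFoldlAdd_of_nodup {xs acc : List Int} (h : (acc ++ xs).Nodup) :
    List.foldl PySem.Set.add acc xs = acc ++ xs := by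
  induction xs generalizing acc with
  | nil => simp
  | cons a t ih =>
    have ha : a ∉ acc := by
      intro hmem
      exact (List.disjoint_of_nodup_append h) hmem (by simp)
    have : PySem.Set.add acc a = acc ++ [a] := by
      simp [PySem.Set.add, PySem.Set.contains, ha]
    rw [List.foldl_cons, this, ih (by simpa using h)]
    simp

lemma pvOfList_of_nodup {xs : List Int} (h : xs.Nodup) : PySem.Set.ofList xs = xs := by
  rw [PySem.Set.ofList_eq_foldl]
  simpa using pvFoldlAdd_of_nodup (acc := []) (by simpa using h)

lemma pvIsIncr_pairwise : ∀ {xs : List Int}, pvIsIncr xs = true → xs.Pairwise (· < ·)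
  | [], _ => List.Pairwise.nil
  | [_], _ => by simp
  | a :: b :: t, h => by
    rw [pvIsIncr, Bool.and_eq_true] at h
    have ht := pvIsIncr_pairwise h.2
    refine List.pairwise_cons.mpr ⟨?_, ht⟩
    intro y hy
    rcases List.mem_cons.mp hy with rfl | hy
    · exact of_decide_eq_true h.1
    · exact lt_trans (of_decide_eq_true h.1) (List.rel_of_pairwise_cons ht hy)

lemma pvSetOfList_eq (xs : List Int) : pvSetOfList xs = PySem.Set.ofList xs := by
  rw [pvSetOfList]
  split
  · rename_i h
    exact (pvOfList_of_nodup ((pvIsIncr_pairwise h).imp (fun h => ne_of_lt h))).symm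
  · rfl

lemma pvSortedFast_eq (xs : List Int) : pvSortedFast xs = PySem.List.sorted xs (fun x => x) false := by
  rw [pvSortedFast]
  split
  · rename_i h
    exact (PySem.List.sorted_eq_self_of_pairwise xs _ ((pvIsIncr_pairwise h).imp (fun h => le_of_lt h))).symm
  · rfl

lemma pvAGetD (xs : List Int) {i : Int} (h : 0 ≤ i) :
    xs.toArray.getD i.toNat 0 = PySem.List.pyGetD xs i 0 := by
  rw [PySem.List.pyGetD_of_nonneg xs 0 h]
  simp only [Array.getD, List.getD_eq_getElem?_getD, List.size_toArray]
  split
  · rename_i hlt; rw [List.getElem?_eq_getElem hlt]; simp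
  · rename_i hge; rw [List.getElem?_eq_none (by omega)]; rfl

-- the 'while i*i <= limit' loop runs exactly for i in range(i0, int(limit**0.5)+1)
lemma pvSieveWhile_eq (limit : Int) :
    ∀ (k : Nat) (i : Int) (a : Array Bool), (limit + 1 - i).toNat ≤ k → 2 ≤ i →
      sieveWhile limit i a = (PySem.List.pyRange i (pyIsqrtFloat limit + 1) 1).foldl (pvMark limit) a := by
  intro k
  induction k with
  | zero =>
    intro i a hk hi
    have h2 : i * 2 ≤ i * i := mul_le_mul_of_nonneg_left hi (by omega)
    have h1 : limit + 1 ≤ i := by omega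
    have hcond : ¬ i * i ≤ limit := by intro hle; linarith
    have hrange : pyIsqrtFloat limit + 1 ≤ i := by
      unfold pyIsqrtFloat
      have : (Nat.sqrt limit.toNat : Int) ≤ limit.toNat := by
        exact_mod_cast Nat.sqrt_le_self limit.toNat
      omega
    rw [sieveWhile, dif_neg hcond, PySem.List.pyRange_one_eq_nil hrange]
    simp
  | succ k ih =>
    intro i a hk hi
    have h2 : i * 2 ≤ i * i := mul_le_mul_of_nonneg_left hi (by omega)
    by_cases hcond : i * i ≤ limit
    · have hil : i ≤ limit := by linarith
      have hnat : i.toNat * i.toNat ≤ limit.toNat := by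
        have hit : (i.toNat : Int) = i := by omega
        have : (0:Int) ≤ limit := by omega
        zify; rw [hit]; omega
      have hlt : i < pyIsqrtFloat limit + 1 := by
        unfold pyIsqrtFloat
        have := Nat.le_sqrt.mpr hnat
        omega
      rw [sieveWhile, dif_pos hcond, PySem.List.pyRange_one_cons hlt, List.foldl_cons]
      exact ih (i + 1) (pvMark limit a i) (by omega) (by omega)
    · have hs : (Nat.sqrt limit.toNat : Int) < i := by
        by_contra hle
        apply hcond
        rcases Int.lt_or_le 0 limit with hpos | hneg
        · have hit : (limit.toNat : Int) = limit := by omega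
          have hnat : i.toNat ≤ Nat.sqrt limit.toNat := by omega
          have h3 := Nat.le_sqrt.mp hnat
          have h4 : (i.toNat * i.toNat : Int) ≤ (limit.toNat : Int) := by exact_mod_cast h3
          have hiti : (i.toNat : Int) = i := by omega
          calc i * i = (i.toNat : Int) * (i.toNat : Int) := by rw [hiti]
            _ ≤ (limit.toNat : Int) := h4
            _ = limit := hit
        · have h0 : limit.toNat = 0 := by omega
          rw [h0, Nat.sqrt_zero] at hle
          simp at hle
          omega
      have hrange : pyIsqrtFloat limit + 1 ≤ i := by unfold pyIsqrtFloat; omega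
      rw [sieveWhile, dif_neg hcond, PySem.List.pyRange_one_eq_nil hrange]
      simp

-- the window of values P[l..r], and the per-element pair condition on a window
def pvWin (P : List Int) (l r : Int) : List Int :=
  (PySem.List.pyRange l (r + 1) 1).map (fun i => PySem.List.pyGetD P i 0)

def pvCond (n : Int) (w : List Int) (p : Int) : Option (Int × Int) :=
  if p ≤ n - p ∧ (n - p) ∈ w then some (p, n - p) else none

lemma pvMem_win {P : List Int} {l r x : Int} :
    x ∈ pvWin P l r ↔ ∃ i : Int, l ≤ i ∧ i ≤ r ∧ x = PySem.List.pyGetD P i 0 := by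
  simp only [pvWin, List.mem_map, PySem.List.mem_pyRange_one]
  constructor
  · rintro ⟨i, ⟨h1, h2⟩, h3⟩; exact ⟨i, h1, by omega, h3.symm⟩
  · rintro ⟨i, h1, h2, h3⟩; exact ⟨i, ⟨h1, by omega⟩, h3.symm⟩

lemma pvMono_lt {P : List Int} (hP : P.Pairwise (· < ·)) {i j : Int}
    (h0 : 0 ≤ i) (hij : i < j) (hj : j < (P.length : Int)) :
    PySem.List.pyGetD P i 0 < PySem.List.pyGetD P j 0 := by
  rw [PySem.List.pyGetD_eq_getElem P 0 h0 (by omega), PySem.List.pyGetD_eq_getElem P 0 (by omega) hj]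
  exact List.pairwise_iff_getElem.mp hP i.toNat j.toNat (by omega) (by omega) (by omega)

lemma pvMono_le {P : List Int} (hP : P.Pairwise (· < ·)) {i j : Int}
    (h0 : 0 ≤ i) (hij : i ≤ j) (hj : j < (P.length : Int)) :
    PySem.List.pyGetD P i 0 ≤ PySem.List.pyGetD P j 0 := by
  rcases eq_or_lt_of_le hij with h | h
  · rw [h]
  · exact le_of_lt (pvMono_lt hP h0 h hj)

lemma pvTwoPtr_eq (P : List Int) (hP : P.Pairwise (· < ·)) (n : Int) :
    ∀ (k : Nat) (l r : Int), (r + 1 - l).toNat ≤ k → 0 ≤ l → r < (P.length : Int) →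
      twoPtr P.toArray n l r = (pvWin P l r).filterMap (pvCond n (pvWin P l r)) := by
  intro k
  induction k with
  | zero =>
    intro l r hk h0 hr
    rw [twoPtr, dif_neg (by omega : ¬ l ≤ r), pvWin, PySem.List.pyRange_one_eq_nil (by omega)]
    simp
  | succ k ih =>
    intro l r hk h0 hr
    by_cases hlr : l ≤ r
    · rw [twoPtr]
      simp only [dif_pos hlr]
      set pl := P.toArray.getD l.toNat 0 with hpl0
      set pr := P.toArray.getD r.toNat 0 with hpr0
      clear_value pl pr
      have hpl : pl = PySem.List.pyGetD P l 0 := by rw [hpl0, pvAGetD P h0]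
      have hpr : pr = PySem.List.pyGetD P r 0 := by rw [hpr0, pvAGetD P (by omega)]
      have hple : pl ≤ pr := by rw [hpl, hpr]; exact pvMono_le hP h0 hlr hr
      by_cases hs : pl + pr = n
      · rw [if_pos hs]
        rcases eq_or_lt_of_le hlr with heq | hlt
        · -- l = r : singleton window, the diagonal pair
          subst heq
          have hpp : pl = pr := by rw [hpl, hpr]
          rw [twoPtr, dif_neg (by omega : ¬ l + 1 ≤ l - 1)]
          have hW : pvWin P l l = [pl] := by
            rw [hpl, pvWin, PySem.List.pyRange_one_cons (by omega : l < l + 1),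
              PySem.List.pyRange_one_eq_nil (by omega : l + 1 ≤ l + 1)]
            simp
          rw [hW]
          have hc : pvCond n [pl] pl = some (pl, pr) := by
            simp only [pvCond]
            rw [if_pos ⟨by omega, by simp; omega⟩, show n - pl = pr by omega]
          rw [List.filterMap_cons_some hc, List.filterMap_nil]
        · -- l < r
          rw [ih (l + 1) (r - 1) (by omega) (by omega) (by omega)]
          have hlt2 : pl < pr := by rw [hpl, hpr]; exact pvMono_lt hP h0 hlt hr
          have hr1 : r - 1 + 1 = r := by ring
          have hW : pvWin P l r = pl :: (pvWin P (l + 1) (r - 1) ++ [pr]) := by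
            rw [hpl, hpr, pvWin, PySem.List.pyRange_one_cons (by omega : l < r + 1),
              PySem.List.pyRange_one_succ_right (by omega : l + 1 ≤ r), pvWin, hr1]
            simp
          rw [hW]
          have hc : pvCond n (pl :: (pvWin P (l + 1) (r - 1) ++ [pr])) pl = some (pl, pr) := by
            have hmem : (n - pl) ∈ pl :: (pvWin P (l + 1) (r - 1) ++ [pr]) := by
              rw [show n - pl = pr by omega]
              simp
            simp only [pvCond]
            rw [if_pos ⟨by omega, hmem⟩, show n - pl = pr by omega]
          have hclast : pvCond n (pl :: (pvWin P (l + 1) (r - 1) ++ [pr])) pr = none := by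
            simp only [pvCond]
            rw [if_neg]
            rintro ⟨h1, -⟩
            omega
          have hcong : ∀ x ∈ pvWin P (l + 1) (r - 1),
              pvCond n (pl :: (pvWin P (l + 1) (r - 1) ++ [pr])) x = pvCond n (pvWin P (l + 1) (r - 1)) x := by
            intro x hx
            obtain ⟨i, hi1, hi2, hxv⟩ := pvMem_win.mp hx
            have hxlt : x < pr := by rw [hxv, hpr]; exact pvMono_lt hP (by omega) (by omega) hr
            have hxgt : pl < x := by rw [hxv, hpl]; exact pvMono_lt hP h0 (by omega) (by omega)
            have hiff : ((n - x) ∈ pl :: (pvWin P (l + 1) (r - 1) ++ [pr])) ↔ ((n - x) ∈ pvWin P (l + 1) (r - 1)) := by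
              constructor
              · intro hm
                rcases List.mem_cons.mp hm with h | h
                · omega
                · rcases List.mem_append.mp h with h | h
                  · exact h
                  · simp at h; omega
              · intro hm
                exact List.mem_cons_of_mem _ (List.mem_append_left _ hm)
            simp only [pvCond, hiff]
          rw [List.filterMap_cons_some hc, List.filterMap_append,
            List.filterMap_cons_none hclast, List.filterMap_nil, List.append_nil,
            List.filterMap_congr hcong]
      · rw [if_neg hs]
        by_cases hs2 : pl + pr < n
        · rw [if_pos hs2]
          rw [ih (l + 1) r (by omega) (by omega) hr]
          have hW : pvWin P l r = pl :: pvWin P (l + 1) r := by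
            rw [hpl, pvWin, PySem.List.pyRange_one_cons (by omega : l < r + 1), pvWin]
            simp
          rw [hW]
          have hub : ∀ x ∈ pl :: pvWin P (l + 1) r, x ≤ pr := by
            intro x hx
            rcases List.mem_cons.mp hx with h | h
            · omega
            · obtain ⟨i, hi1, hi2, hxv⟩ := pvMem_win.mp h
              rw [hxv, hpr]
              exact pvMono_le hP (by omega) hi2 hr
          have hc : pvCond n (pl :: pvWin P (l + 1) r) pl = none := by
            simp only [pvCond]
            rw [if_neg]
            rintro ⟨-, h2⟩
            have := hub _ h2
            omega
          have hcong : ∀ x ∈ pvWin P (l + 1) r,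
              pvCond n (pl :: pvWin P (l + 1) r) x = pvCond n (pvWin P (l + 1) r) x := by
            intro x hx
            obtain ⟨i, hi1, hi2, hxv⟩ := pvMem_win.mp hx
            have hxle : x ≤ pr := by rw [hxv, hpr]; exact pvMono_le hP (by omega) hi2 hr
            have hiff : ((n - x) ∈ pl :: pvWin P (l + 1) r) ↔ ((n - x) ∈ pvWin P (l + 1) r) := by
              constructor
              · intro hm
                rcases List.mem_cons.mp hm with h | h
                · omega
                · exact h
              · exact fun hm => List.mem_cons_of_mem _ hm
            simp only [pvCond, hiff]
          rw [List.filterMap_cons_none hc, List.filterMap_congr hcong]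
        · rw [if_neg hs2]
          rw [ih l (r - 1) (by omega) h0 (by omega)]
          have hr1 : r - 1 + 1 = r := by ring
          have hW : pvWin P l r = pvWin P l (r - 1) ++ [pr] := by
            rw [hpr, pvWin, PySem.List.pyRange_one_succ_right (by omega : l ≤ r), pvWin, hr1]
            simp
          rw [hW]
          have hlb : ∀ x ∈ pvWin P l (r - 1), pl ≤ x := by
            intro x hx
            obtain ⟨i, hi1, hi2, hxv⟩ := pvMem_win.mp hx
            rw [hxv, hpl]
            exact pvMono_le hP h0 hi1 (by omega)
          have hclast : pvCond n (pvWin P l (r - 1) ++ [pr]) pr = none := by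
            simp only [pvCond]
            rw [if_neg]
            rintro ⟨h1, -⟩
            omega
          have hcong : ∀ x ∈ pvWin P l (r - 1),
              pvCond n (pvWin P l (r - 1) ++ [pr]) x = pvCond n (pvWin P l (r - 1)) x := by
            intro x hx
            have hxge : pl ≤ x := hlb _ hx
            have hiff : ((n - x) ∈ pvWin P l (r - 1) ++ [pr]) ↔ ((n - x) ∈ pvWin P l (r - 1)) := by
              constructor
              · intro hm
                rcases List.mem_append.mp hm with h | h
                · exact h
                · simp at h; omega
              · exact fun hm => List.mem_append_left _ hm
            simp only [pvCond, hiff]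
          rw [List.filterMap_append, List.filterMap_cons_none hclast, List.filterMap_nil,
            List.append_nil, List.filterMap_congr hcong]
    · rw [twoPtr, dif_neg hlr, pvWin, PySem.List.pyRange_one_eq_nil (by omega)]
      simp

lemma pvPrimes_eq (limit : Int) : pvPrimesUpto limit = sieve_of_eratosthenes limit := by
  rw [pvPrimesUpto, sieve_of_eratosthenes]
  by_cases h : limit < 2
  · simp [h]
  · simp only [if_neg h]
    rw [pvSieveWhile_eq limit (limit + 1 - 2).toNat 2 (pvInitFlags limit) (by omega) (by omega)]

lemma pvSievePairwise (limit : Int) : (sieve_of_eratosthenes limit).Pairwise (· < ·) := by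
  rw [sieve_of_eratosthenes]
  by_cases h : limit < 2
  · simp [h]
  · simp only [if_neg h]
    exact List.Pairwise.filter _ (PySem.List.pairwise_lt_pyRange_one _ _)

-- the break-at-n//2 scan over a sorted list is a filterMap over the whole list
lemma pvFgp_eq (n : Int) (seen : Std.HashSet Int) :
    ∀ Q : List Int, Q.Pairwise (· ≤ ·) →
      fgpLoop n seen Q = Q.filterMap
        (fun p => if p ≤ PySem.Int.floordiv n 2 ∧ seen.contains (n - p) = true
                  then some (p, n - p) else none) := by
  intro Q hQ
  induction Q with
  | nil => rfl
  | cons p rest ih =>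
    obtain ⟨hhead, hrest⟩ := List.pairwise_cons.mp hQ
    rw [fgpLoop]
    by_cases h1 : p > PySem.Int.floordiv n 2
    · rw [if_pos h1]
      symm
      rw [List.filterMap_cons_none (by rw [if_neg]; rintro ⟨h, -⟩; omega)]
      rw [List.filterMap_eq_nil_iff]
      intro x hx
      rw [if_neg]
      rintro ⟨h, -⟩
      have := hhead x hx
      omega
    · rw [if_neg h1]
      by_cases h2 : seen.contains (n - p) = true
      · rw [if_pos h2, List.filterMap_cons_some (by rw [if_pos ⟨by omega, h2⟩]), ih hrest]
      · rw [if_neg h2, List.filterMap_cons_none (by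
          rw [if_neg]; rintro ⟨-, h⟩; exact h2 h), ih hrest]

-- per even n > 2: A's scan over sorted(set(primes)) equals B's two-pointer sweep
lemma pvPerN (P : List Int) (hP : P.Pairwise (· < ·)) (n : Int) (hn2 : 2 < n) (hnev : n % 2 = 0) :
    find_goldbach_pairs n (PySem.Set.ofList P) = twoPtr P.toArray n 0 ((P.length : Int) - 1) := by
  have hnodup : P.Nodup := hP.imp (fun h => ne_of_lt h)
  have hofl : PySem.Set.ofList P = P := pvOfList_of_nodup hnodup
  have hmod : PySem.Int.mod n 2 = n % 2 := PySem.Int.mod_eq_emod_of_pos (by norm_num)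
  rw [find_goldbach_pairs, if_neg (by rw [hmod]; omega), hofl, pvSortedFast_eq,
    PySem.List.sorted_eq_self_of_pairwise P _ (hP.imp (fun h => le_of_lt h)),
    pvFgp_eq n (Std.HashSet.ofList P) P (hP.imp (fun h => le_of_lt h)),
    pvTwoPtr_eq P hP n ((P.length : Int)).toNat 0 ((P.length : Int) - 1) (by omega) (by omega) (by omega)]
  have hwin : pvWin P 0 ((P.length : Int) - 1) = P := by
    rw [pvWin, show (P.length : Int) - 1 + 1 = (P.length : Int) by ring]
    exact PySem.List.map_pyGetD_pyRange_zero' P 0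
  rw [hwin]
  apply List.filterMap_congr
  intro x hx
  have hdiv : x ≤ PySem.Int.floordiv n 2 ↔ x * 2 ≤ n := PySem.Int.le_floordiv_iff_mul_le (by norm_num)
  have hiff : (x ≤ PySem.Int.floordiv n 2 ∧ (Std.HashSet.ofList P).contains (n - x) = true)
      ↔ (x ≤ n - x ∧ (n - x) ∈ P) := by
    simp only [Std.HashSet.contains_ofList, hdiv, List.contains_iff_mem]
    constructor
    · rintro ⟨h1, h2⟩; exact ⟨by omega, h2⟩
    · rintro ⟨h1, h2⟩; exact ⟨by omega, h2⟩
  rw [pvCond, if_congr hiff rfl rfl]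

-- ===== VERDICT (by name: the statement is the Claim_ definition above) =====
theorem verify_goldbach_range_spec : Claim_equal_verify_goldbach_range := by
  unfold Claim_equal_verify_goldbach_range
  intro start end_ _hdom
  unfold Spec_verify_goldbach_range
  simp only [verify_goldbach_range, verify_goldbach_range_alt]
  rw [pvPrimes_eq, pvSetOfList_eq]
  simp only [List.size_toArray]
  set s1 := if start < 4 then 4 else start with hs1
  set s2 := if PySem.Int.mod s1 2 ≠ 0 then s1 + 1 else s1 with hs2
  set e2 := if PySem.Int.mod end_ 2 ≠ 0 then end_ - 1 else end_ with he2
  have hmod : PySem.Int.mod s1 2 = s1 % 2 := PySem.Int.mod_eq_emod_of_pos (by norm_num)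
  have hs14 : 4 ≤ s1 := by rw [hs1]; split_ifs with h <;> omega
  have hs2p : 4 ≤ s2 ∧ s2 % 2 = 0 := by
    rw [hs2]
    split_ifs with h
    · rw [hmod] at h; constructor <;> omega
    · rw [hmod] at h; constructor <;> omega
  congr 1
  apply PySem.List.foldl_congr_mem
  intro d n hn
  rw [PySem.List.mem_pyRange_iff_of_pos (by norm_num)] at hn
  obtain ⟨hn1, hn2, hn3⟩ := hn
  congr 1
  exact pvPerN _ (pvSievePairwise e2) n (by omega) (by omega)
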